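-- pv_equiv track=rewrite | github.com/EgorDzyublik/Sberr_1 | media/functions.py | is_rewrite
-- ===== SOURCE A (Python) =====
-- def levenstein(str_1, str_2):
--     n, m = len(str_1), len(str_2)
--     if n > m:
--         str_1, str_2 = str_2, str_1
--         n, m = m, n
--
--     current_row = range(n + 1)
--     for i in range(1, m + 1):
--         previous_row, current_row = current_row, [i] + [0] * n
--         for j in range(1, n + 1):
--             add, delete, change = previous_row[j] + 1, current_row[j - 1] + 1, previous_row[j - 1]
--             if str_1[j - 1] != str_2[i - 1]:
--                 change += 1
--             current_row[j] = min(add, delete, change)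
--
--     return current_row[n]
--
-- def is_rewrite(str1, str2):
--     if str1[-1]!=str2[-1]:
--         return False
--     punct='''!"#$%&'()*+,./:;<=>?@[\]^_`{|}~'''
--     for i in range(len(punct)):
--         str1=str1.replace(punct[i], ' ')
--         str2=str2.replace(punct[i], ' ')
--     mas1=(str1.lower().split())
--     mas2=(str2.lower().split())
--     mas1.sort()
--     mas2.sort()
--     if (mas1==mas2):
--         return True
--     word1=[a for a in mas1 if a not in mas2]
--     word2=[a for a in mas2 if a not in mas1]
--     if (len(word1)!=1 or len(word2)!=1):
--         return False
--     if levenstein(word1[0], word2[0])==1 and len(word1[0])==len(word2[0]):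
--         return True
--     return False
-- ===== SOURCE B (Python) =====
-- def is_rewrite(str1, str2):
--     if str1[-1] != str2[-1]:
--         return False
--     punct = '''!"#$%&'()*+,./:;<=>?@[\]^_`{|}~'''
--     for ch in punct:
--         str1 = str1.replace(ch, ' ')
--         str2 = str2.replace(ch, ' ')
--     mas1 = sorted(str1.lower().split())
--     mas2 = sorted(str2.lower().split())
--     if mas1 == mas2:
--         return True
--     word1 = [a for a in mas1 if a not in mas2]
--     word2 = [a for a in mas2 if a not in mas1]
--     if len(word1) != 1 or len(word2) != 1:
--         return False
--     w1, w2 = word1[0], word2[0]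
--     # a one-word edit of equal length is exactly one differing character position
--     return len(w1) == len(w2) and sum(c1 != c2 for c1, c2 in zip(w1, w2)) == 1
-- ===== Notes on version B (the rewrite author's own statement) =====
-- stated objective: faster
-- what changed: The O(k^2) Levenshtein DP table over the two candidate words is replaced by a single linear zip scan: the words are a one-word edit iff they have equal length and differ in exactly one character position (for equal-length strings edit distance 1 is exactly one substitution).
import Mathlib
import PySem

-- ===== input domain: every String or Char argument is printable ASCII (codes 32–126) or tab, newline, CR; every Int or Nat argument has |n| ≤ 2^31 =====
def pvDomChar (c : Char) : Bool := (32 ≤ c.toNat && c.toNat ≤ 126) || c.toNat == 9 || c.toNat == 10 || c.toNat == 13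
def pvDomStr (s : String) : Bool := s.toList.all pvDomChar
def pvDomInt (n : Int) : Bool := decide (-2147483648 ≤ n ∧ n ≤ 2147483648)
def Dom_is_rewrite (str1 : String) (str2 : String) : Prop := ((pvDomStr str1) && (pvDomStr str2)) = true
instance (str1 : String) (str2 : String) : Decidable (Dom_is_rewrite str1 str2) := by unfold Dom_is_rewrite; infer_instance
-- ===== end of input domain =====

-- B replaces A's quadratic Levenshtein DP table by a single linear zip scan counting mismatching
-- positions (for equal-length words edit distance 1 means exactly one substitution); objective: faster.

-- ===== PORT A =====

-- the punctuation string of A ('\]' in the Python triple-quoted literal is a literal backslash + ']')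
def pyPunct : List Char := "!\"#$%&'()*+,./:;<=>?@[\\]^_`{|}~".toList

-- inner loop of levenstein: for j in range(1, n+1) filling current_row left to right.
-- state: remaining chars of str_1, the value just written (current_row[j-1]), previous_row from index j-1 on.
def levRowLoop (c2 : Char) : List Char → Nat → List Nat → List Nat
  | [], _, _ => []
  | a :: s, left, p0 :: p1 :: ps =>
      let change := p0 + (if a ≠ c2 then 1 else 0)
      let v := min (p1 + 1) (min (left + 1) change)
      v :: levRowLoop c2 s v (p1 :: ps)
  | _ :: _, _, _ => []     -- unreachable: previous_row always has length (remaining)+1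

-- outer loop: for i in range(1, m+1), current_row := [i] + cells
def levOuter (s1 : List Char) : List Char → Nat → List Nat → List Nat
  | [], _, cur => cur
  | b :: t, i, cur => levOuter s1 t (i + 1) (i :: levRowLoop b s1 i cur)

def levenstein (str_1 str_2 : String) : Nat :=
  let a := str_1.toList
  let b := str_2.toList
  let p := if a.length > b.length then (b, a) else (a, b)
  -- current_row[n]: index n is always in range (row length n+1), so the default is never used
  (levOuter p.1 p.2 1 (List.range (p.1.length + 1))).getD p.1.length 0

def is_rewrite (str1 : String) (str2 : String) : Bool :=
  match PySem.Str.pyGet? str1 (-1), PySem.Str.pyGet? str2 (-1) with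
  | some c1, some c2 =>
    if c1 ≠ c2 then false
    else
      let st := pyPunct.foldl
        (fun (t : String × String) c =>
          (PySem.Str.replace t.1 (String.ofList [c]) " ", PySem.Str.replace t.2 (String.ofList [c]) " "))
        (str1, str2)
      let mas1 := PySem.List.sorted (PySem.Str.split₀ (PySem.Str.lower st.1)) (fun w => w) false
      let mas2 := PySem.List.sorted (PySem.Str.split₀ (PySem.Str.lower st.2)) (fun w => w) false
      if mas1 = mas2 then true
      else
        let word1 := mas1.filter (fun a => decide (a ∉ mas2))
        let word2 := mas2.filter (fun a => decide (a ∉ mas1))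
        if word1.length ≠ 1 ∨ word2.length ≠ 1 then false
        else
          -- word1[0]/word2[0]: in range, both lists have length 1 here
          if levenstein (word1.getD 0 "") (word2.getD 0 "") = 1 ∧
             PySem.Str.len (word1.getD 0 "") = PySem.Str.len (word2.getD 0 "") then true
          else false
  | _, _ => false     -- str[-1] raises IndexError: excluded by Pre_is_rewrite

-- ===== PORT B =====

-- B-side copy of the punctuation string
def pyPunctAlt : List Char := "!\"#$%&'()*+,./:;<=>?@[\\]^_`{|}~".toList

def is_rewrite_alt (str1 : String) (str2 : String) : Bool :=
  match PySem.Str.pyGet? str1 (-1) with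
  | none => false     -- str1[-1] raises IndexError: excluded by Pre_is_rewrite
  | some c1 =>
    match PySem.Str.pyGet? str2 (-1) with
    | none => false   -- str2[-1] raises IndexError: excluded by Pre_is_rewrite
    | some c2 =>
      if c1 ≠ c2 then false
      else
        let st := pyPunctAlt.foldl
          (fun (t : String × String) c =>
            (PySem.Str.replace t.1 (String.ofList [c]) " ", PySem.Str.replace t.2 (String.ofList [c]) " "))
          (str1, str2)
        let mas1 := PySem.List.sorted (PySem.Str.split₀ (PySem.Str.lower st.1)) (fun w => w) false
        let mas2 := PySem.List.sorted (PySem.Str.split₀ (PySem.Str.lower st.2)) (fun w => w) false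
        if mas1 = mas2 then true
        else
          let word1 := mas1.filter (fun a => decide (a ∉ mas2))
          let word2 := mas2.filter (fun a => decide (a ∉ mas1))
          if word1.length ≠ 1 ∨ word2.length ≠ 1 then false
          else
            let w1 := (word1.getD 0 "").toList
            let w2 := (word2.getD 0 "").toList
            -- sum(c1 != c2 for c1, c2 in zip(w1, w2)) == 1, a 0/1-sum, is countP
            decide (w1.length = w2.length) && ((w1.zip w2).countP (fun p => p.1 != p.2) == 1)

-- ===== PRECONDITION & SPEC =====

-- Pre_ excludes exactly the inputs where an argument is the empty string: there A's
-- 'str1[-1]' raises IndexError (B raises there too).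
def Pre_is_rewrite (str1 : String) (str2 : String) : Prop := str1 ≠ "" ∧ str2 ≠ ""
instance (str1 : String) (str2 : String) : Decidable (Pre_is_rewrite str1 str2) := by
  unfold Pre_is_rewrite; infer_instance

def pvWitness_is_rewrite : String × String := ("he has a cat.", "he has a hat.")

def Spec_is_rewrite (str1 : String) (str2 : String) (out : Bool) : Prop := out = is_rewrite_alt str1 str2
instance (str1 : String) (str2 : String) (out : Bool) : Decidable (Spec_is_rewrite str1 str2 out) := by unfold Spec_is_rewrite; infer_instance

-- ===== CLAIM (what is proved, stated in full; the proofs are below) =====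
def Claim_equal_is_rewrite : Prop := ∀ (str1 : String) (str2 : String), Dom_is_rewrite str1 str2 → Pre_is_rewrite str1 str2 → Spec_is_rewrite str1 str2 (is_rewrite str1 str2)

-- ===== LEMMAS AND PROOFS =====

-- the textbook Levenshtein distance, by head recursion
def L : List Char → List Char → Nat
  | [], t => t.length
  | _ :: s, [] => s.length + 1
  | a :: s, b :: t =>
      min (L s (b :: t) + 1) (min (L (a :: s) t + 1) (L s t + (if a ≠ b then 1 else 0)))

-- Hamming mismatch count (defined on the common prefix, like zip)
def ham : List Char → List Char → Nat
  | a :: s, b :: t => (if a ≠ b then 1 else 0) + ham s t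
  | _, _ => 0

-- the row of DP values: rowL u w s = [L u w, L (s₀::u) w, L (s₁::s₀::u) w, …]
def rowTail (w : List Char) : List Char → List Char → List Nat
  | _, [] => []
  | u, a :: s => L (a :: u) w :: rowTail w (a :: u) s

def rowL (u w s : List Char) : List Nat := L u w :: rowTail w u s

theorem L_nil_right : ∀ s : List Char, L s [] = s.length := by
  intro s; cases s <;> simp [L]

theorem L_len_bound (n : Nat) : ∀ s t : List Char, s.length + t.length ≤ n →
    s.length ≤ L s t + t.length ∧ t.length ≤ L s t + s.length := by
  induction n with
  | zero =>
    intro s t h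
    have hs : s = [] := by cases s <;> simp_all
    have ht : t = [] := by cases t <;> simp_all
    subst hs; subst ht; simp [L]
  | succ n ih =>
    intro s t h
    match s, t with
    | [], t => simp [L]
    | a :: s, [] => simp [L]
    | a :: s, b :: t =>
      have h1 := ih s (b :: t) (by simp at h ⊢; omega)
      have h2 := ih (a :: s) t (by simp at h ⊢; omega)
      have h3 := ih s t (by simp at h ⊢; omega)
      simp only [L, List.length_cons] at *
      split_ifs at * <;> omega

theorem le_L_cons_right (b : Char) (s t : List Char) : L s t ≤ L s (b :: t) + 1 := by
  induction s generalizing t with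
  | nil => simp [L]; omega
  | cons a s ih =>
    cases t with
    | nil =>
      have hb := L_len_bound (s.length + [b].length) s [b] le_rfl
      have h0 := L_nil_right s
      simp only [L, List.length_cons, List.length_nil] at *
      split_ifs <;> omega
    | cons b' t =>
      have h1 := ih (b' :: t)
      simp only [L] at *
      split_ifs at * <;> omega

theorem le_L_cons_left (a : Char) (s t : List Char) : L s t ≤ L (a :: s) t + 1 := by
  induction t generalizing s with
  | nil => simp [L_nil_right]; omega
  | cons b t ih =>
    cases s with
    | nil =>
      have hb := L_len_bound ([a].length + t.length) [a] t le_rfl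
      simp only [L, List.length_cons, List.length_nil] at *
      split_ifs <;> omega
    | cons a' s =>
      have h1 := ih (a' :: s)
      simp only [L] at *
      split_ifs at * <;> omega

theorem L_cons_cons_same (a : Char) (s t : List Char) : L (a :: s) (a :: t) = L s t := by
  have h1 := le_L_cons_right a s t
  have h2 := le_L_cons_left a s t
  simp only [L, ne_eq, not_true_eq_false, if_false]
  omega

theorem L_eq_zero_iff (s t : List Char) : L s t = 0 ↔ s = t := by
  induction s generalizing t with
  | nil => cases t <;> simp [L]
  | cons a s ih =>
    cases t with
    | nil => simp [L]
    | cons b t =>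
      simp only [L]
      constructor
      · intro h
        have h3 : L s t + (if a ≠ b then 1 else 0) = 0 := by omega
        by_cases hab : a = b
        · subst hab
          simp only [ne_eq, not_true_eq_false, if_false, add_zero] at h3
          simp [(ih t).mp h3]
        · simp [hab] at h3
      · intro h
        obtain ⟨rfl, rfl⟩ := List.cons_eq_cons.mp h
        have h0 := (ih s).mpr rfl
        simp only [ne_eq, not_true_eq_false, if_false]
        omega

theorem ham_self (s : List Char) : ham s s = 0 := by
  induction s with
  | nil => rfl
  | cons a s ih => simp [ham, ih]

theorem L_le_ham (s t : List Char) (h : s.length = t.length) : L s t ≤ ham s t := by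
  induction s generalizing t with
  | nil => cases t with | nil => simp [L] | cons b t => simp at h
  | cons a s ih =>
    cases t with
    | nil => simp at h
    | cons b t =>
      simp only [List.length_cons] at h
      by_cases hab : a = b
      · subst hab
        rw [L_cons_cons_same]
        simp only [ham, ne_eq, not_true_eq_false, if_false, zero_add]
        exact ih t (by omega)
      · have h1 := ih t (by omega)
        simp only [L, ham, hab, ne_eq, not_false_eq_true, if_true]
        omega

theorem L_one_iff_ham_one (s t : List Char) (h : s.length = t.length) :
    L s t = 1 ↔ ham s t = 1 := by
  induction s generalizing t with
  | nil => cases t with | nil => simp [L, ham] | cons b t => simp at h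
  | cons a s ih =>
    cases t with
    | nil => simp at h
    | cons b t =>
      simp only [List.length_cons] at h
      by_cases hab : a = b
      · subst hab
        rw [L_cons_cons_same]
        simp only [ham, ne_eq, not_true_eq_false, if_false, zero_add]
        exact ih t (by omega)
      · constructor
        · intro h1
          -- min = 0: the two length-changing branches are impossible, so s = t
          simp only [L, hab, ne_eq, not_false_eq_true, if_true] at h1
          have hst : L s t = 0 := by
            rcases Nat.lt_or_ge 0 (L s t) with hp | hz
            · exfalso
              have e1 : L s (b :: t) ≠ 0 := by
                rw [ne_eq, L_eq_zero_iff]; intro hh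
                have := congrArg List.length hh; simp at this; omega
              have e2 : L (a :: s) t ≠ 0 := by
                rw [ne_eq, L_eq_zero_iff]; intro hh
                have := congrArg List.length hh; simp at this; omega
              omega
            · omega
          have := (L_eq_zero_iff s t).mp hst
          subst this
          simp [ham, hab, ham_self]
        · intro h1
          simp only [ham, hab, ne_eq, not_false_eq_true, if_true] at h1
          have hst : ham s t = 0 := by omega
          -- upper bound: L ≤ ham = 1; lower bound: L ≠ 0 since a ≠ b
          have hub : L (a :: s) (b :: t) ≤ 1 := by
            have := L_le_ham (a :: s) (b :: t) (by simp; omega)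
            simp only [ham, hab, ne_eq, not_false_eq_true, if_true] at this
            omega
          have hlb : L (a :: s) (b :: t) ≠ 0 := by
            rw [ne_eq, L_eq_zero_iff]
            intro hh
            exact hab (by injection hh)
          omega

-- countP over the zip is the Hamming count
theorem countP_zip_eq_ham (s t : List Char) :
    (s.zip t).countP (fun p => p.1 != p.2) = ham s t := by
  induction s generalizing t with
  | nil => simp [ham]
  | cons a s ih =>
    cases t with
    | nil => simp [ham]
    | cons b t =>
      by_cases hab : a = b
      · subst hab; simp [ham, ih]
      · simp [ham, hab, ih, Nat.add_comm]

theorem ham_append_last (s t : List Char) (a b : Char) (h : s.length = t.length) :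
    ham (s ++ [a]) (t ++ [b]) = ham s t + (if a ≠ b then 1 else 0) := by
  induction s generalizing t with
  | nil => cases t with | nil => simp [ham] | cons c t => simp at h
  | cons c s ih =>
    cases t with
    | nil => simp at h
    | cons d t =>
      simp only [List.cons_append, ham]
      rw [ih t (by simpa using h)]
      omega

theorem ham_reverse (s t : List Char) (h : s.length = t.length) :
    ham s.reverse t.reverse = ham s t := by
  induction s generalizing t with
  | nil => cases t with | nil => rfl | cons b t => simp at h
  | cons a s ih =>
    cases t with
    | nil => simp at h
    | cons b t =>
      simp only [List.reverse_cons]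
      rw [ham_append_last _ _ _ _ (by simp; simpa using h), ih t (by simpa using h)]
      simp [ham, Nat.add_comm]

-- === DP correctness: the imperative loops compute rowL ===

theorem L_cons_cons_eq_min (a b : Char) (u w : List Char) :
    L (a :: u) (b :: w) =
      min (L (a :: u) w + 1) (min (L u (b :: w) + 1) (L u w + (if a ≠ b then 1 else 0))) := by
  simp only [L]
  split_ifs <;> omega

theorem rowTail_spec (b : Char) (w : List Char) :
    ∀ (s u : List Char),
      levRowLoop b s (L u (b :: w)) (L u w :: rowTail w u s) = rowTail (b :: w) u s := by
  intro s
  induction s with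
  | nil => intro u; simp [levRowLoop, rowTail]
  | cons a s ih =>
    intro u
    simp only [rowTail, levRowLoop]
    rw [← L_cons_cons_eq_min a b u w]
    exact congrArg (List.cons (L (a :: u) (b :: w))) (ih (a :: u))

theorem levRowLoop_spec (b : Char) (w : List Char) (s u : List Char) :
    L u (b :: w) :: levRowLoop b s (L u (b :: w)) (rowL u w s) = rowL u (b :: w) s := by
  simp only [rowL]
  exact congrArg (List.cons (L u (b :: w))) (rowTail_spec b w s u)

theorem levOuter_spec (s1 : List Char) :
    ∀ (t w : List Char),
      levOuter s1 t (w.length + 1) (rowL [] w s1) = rowL [] (t.reverse ++ w) s1 := by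
  intro t
  induction t with
  | nil => intro w; simp [levOuter]
  | cons b t ih =>
    intro w
    have hhead : L ([] : List Char) (b :: w) = w.length + 1 := by simp [L]
    have hstep := levRowLoop_spec b w s1 []
    rw [hhead] at hstep
    simp only [levOuter]
    rw [hstep]
    have := ih (b :: w)
    simp only [List.length_cons] at this
    rw [this]
    simp

theorem rowTail_nil (s : List Char) : ∀ u : List Char,
    rowTail [] u s = List.range' (u.length + 1) s.length := by
  induction s with
  | nil => intro u; simp [rowTail]
  | cons a s ih =>
    intro u
    simp only [rowTail, L_nil_right, List.length_cons]
    rw [ih (a :: u)]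
    simp [List.range'_succ]

theorem rowL_nil (s u : List Char) : rowL u [] s = List.range' u.length (s.length + 1) := by
  simp [rowL, rowTail_nil, L_nil_right, List.range'_succ]

theorem rowL_getD (w : List Char) : ∀ (s u : List Char),
    (rowL u w s).getD s.length 0 = L (s.reverse ++ u) w := by
  intro s
  induction s with
  | nil => intro u; simp [rowL]
  | cons a s ih =>
    intro u
    have := ih (a :: u)
    simp only [rowL, rowTail, List.length_cons, List.getD_cons_succ] at *
    rw [this]
    simp

-- levenstein on equal-length words computes L on the reversed words
theorem levenstein_eq_L_reverse (w1 w2 : String)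
    (h : w1.toList.length = w2.toList.length) :
    levenstein w1 w2 = L w1.toList.reverse w2.toList.reverse := by
  simp only [levenstein]
  rw [show (if w1.toList.length > w2.toList.length then (w2.toList, w1.toList)
        else (w1.toList, w2.toList)) = (w1.toList, w2.toList) from if_neg (by omega)]
  have hinit : List.range (w1.toList.length + 1) = rowL [] [] w1.toList := by
    rw [rowL_nil w1.toList [], List.range_eq_range']
    simp
  simp only []
  rw [hinit]
  have houter := levOuter_spec w1.toList w2.toList []
  simp only [List.length_nil, List.append_nil] at houter
  rw [houter, rowL_getD]
  simp

-- the final tests agree: (lev == 1 and len eq)  ↔  (len eq and one mismatch in zip)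
theorem final_test_eq (w1 w2 : String) :
    (if levenstein w1 w2 = 1 ∧ PySem.Str.len w1 = PySem.Str.len w2 then true else false) =
    (decide (w1.toList.length = w2.toList.length) &&
      ((w1.toList.zip w2.toList).countP (fun p => p.1 != p.2) == 1)) := by
  by_cases h : w1.toList.length = w2.toList.length
  · have hrev : w1.toList.reverse.length = w2.toList.reverse.length := by simp [h]
    have key : levenstein w1 w2 = 1 ↔
        (w1.toList.zip w2.toList).countP (fun p => p.1 != p.2) = 1 := by
      rw [levenstein_eq_L_reverse w1 w2 h, L_one_iff_ham_one _ _ hrev,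
        ham_reverse _ _ h, countP_zip_eq_ham]
    have hlen : PySem.Str.len w1 = PySem.Str.len w2 := by
      simp [PySem.Str.len_eq, h]
    by_cases h1 : levenstein w1 w2 = 1
    · simp [h1, h, key.mp h1]
    · have h2 : ¬ (w1.toList.zip w2.toList).countP (fun p => p.1 != p.2) = 1 :=
        fun hc => h1 (key.mpr hc)
      simp [h1, h, h2]
  · have h' : ¬ w1.length = w2.length := by simpa using h
    simp [PySem.Str.len_eq, h']

theorem pyPunctAlt_eq_pyPunct : pyPunctAlt = pyPunct := rfl

-- ===== VERDICT (by name: the statement is the Claim_ definition above) =====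
theorem is_rewrite_spec : Claim_equal_is_rewrite := by
  intro str1 str2 _ _
  unfold Spec_is_rewrite is_rewrite is_rewrite_alt
  rw [pyPunctAlt_eq_pyPunct]
  cases h1 : PySem.Str.pyGet? str1 (-1) with
  | none => rfl
  | some c1 =>
    cases h2 : PySem.Str.pyGet? str2 (-1) with
    | none => rfl
    | some c2 =>
      simp only []
      split_ifs with hc hmas hword htest
      · rfl
      · rfl
      · rfl
      · rw [← final_test_eq, if_pos htest]
      · rw [← final_test_eq, if_neg htest]
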